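-- pv_equiv track=rewrite | github.com/jacobchrismarsh/peg_solitaire | peg_solitaire_game.py | makeTestBoards
-- ===== SOURCE A (Python) =====
-- N_SQ = 7
--
-- PEG_EXIST = 1
--
-- PEG_WALL = 3
--
-- def makeTestBoards(board_list):
--     # Create a 2 dimensional array. A two dimensional
--     # array is simply a list of lists.
--     grid = []
--     for row in range(N_SQ):
--         # Add an empty array that will hold each cell
--         # in this row
--         grid.append([])
--         for column in range(N_SQ):
--             # MAKE A CROSS SHAPE
--             if (
--                 (row < 2 and column < 2)
--                 or (row >= 5 and column < 2)
--                 or (row >= 5 and column >= 5)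
--                 or (row < 2 and column >= 5)
--             ):
--                 grid[row].append(PEG_WALL)
--             else:
--                 grid[row].append(PEG_EXIST)  # Append a cell
--     # Need at least one hole in the center
--     grid[3][3] = 0
--     board_list.append(grid)
--
--     grid = []
--     for row in range(N_SQ):
--         grid.append([])
--         for column in range(N_SQ):
--             # MAKE A SQUARE SHAPE
--             grid[row].append(PEG_EXIST)  # Append a cell
--     grid[3][3] = 0
--     board_list.append(grid)
--
--     grid = []
--     for row in range(N_SQ):
--         grid.append([])
--         for column in range(N_SQ):
--             # MAKE AN H SHAPE
--             if (row < 2 and column == 3) or (row >= 5 and column == 3):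
--                 grid[row].append(PEG_WALL)
--             else:
--                 grid[row].append(PEG_EXIST)
--     grid[3][3] = 0
--     board_list.append(grid)
--     return board_list
-- ===== SOURCE B (Python) =====
-- N_SQ = 7
--
-- PEG_EXIST = 1
--
-- PEG_WALL = 3
--
-- def makeTestBoards(board_list):
--     # Build each board as a uniform fill of pegs, then patch in the walls
--     # by explicit index assignments (instead of a branch inside the fill loop).
--     def uniform():
--         return [[PEG_EXIST] * N_SQ for _ in range(N_SQ)]
--
--     cross = uniform()
--     for r in (0, 1, 5, 6):
--         for c in (0, 1, 5, 6):
--             cross[r][c] = PEG_WALL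
--
--     square = uniform()
--
--     h = uniform()
--     for r in (0, 1, 5, 6):
--         h[r][3] = PEG_WALL
--
--     for g in (cross, square, h):
--         g[3][3] = 0
--         board_list.append(g)
--     return board_list
-- ===== Notes on version B (the rewrite author's own statement) =====
-- stated objective: simpler
-- what changed: Replaces the conditional-per-cell nested fill loops with a uniform fill of PEG_EXIST followed by targeted index assignments that patch in the walls, and one loop that punches the centre hole and appends all three boards.
import Mathlib
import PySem

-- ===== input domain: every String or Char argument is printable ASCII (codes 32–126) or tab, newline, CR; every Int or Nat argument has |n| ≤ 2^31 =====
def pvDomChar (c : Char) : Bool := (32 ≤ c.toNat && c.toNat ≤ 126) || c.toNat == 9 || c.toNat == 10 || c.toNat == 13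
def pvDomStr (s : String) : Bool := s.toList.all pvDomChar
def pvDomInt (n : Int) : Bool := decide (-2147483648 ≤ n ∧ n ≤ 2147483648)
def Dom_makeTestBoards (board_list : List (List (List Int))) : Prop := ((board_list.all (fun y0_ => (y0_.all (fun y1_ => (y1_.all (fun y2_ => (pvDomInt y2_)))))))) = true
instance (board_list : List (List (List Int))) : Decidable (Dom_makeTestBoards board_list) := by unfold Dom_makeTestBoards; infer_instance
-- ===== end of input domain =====

-- B builds each 7x7 board as a uniform peg fill and patches the walls in by index,
-- instead of A's branch inside the nested fill loops (objective: simpler).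
-- Both the Python A and B mutate board_list in place by appending; the equivalence
-- proved here is about the returned value (the ports are pure).

-- ===== PORT A =====
-- grid[3][3] = 0 / grid[r][c] = v with literal in-range non-negative indices: exact as List.set
def pvSetCell (g : List (List Int)) (r c : Nat) (v : Int) : List (List Int) :=
  g.set r ((g.getD r []).set c v)

def pvCrossA : List (List Int) :=
  (PySem.List.pyRange 0 7 1).foldl (fun grid row =>
    grid ++ [((PySem.List.pyRange 0 7 1).foldl (fun cells column =>
      if (row < 2 ∧ column < 2) ∨ (row ≥ 5 ∧ column < 2) ∨
         (row ≥ 5 ∧ column ≥ 5) ∨ (row < 2 ∧ column ≥ 5)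
      then cells ++ [(3 : Int)]   -- PEG_WALL
      else cells ++ [(1 : Int)])  -- PEG_EXIST
      [])]) []

def pvSquareA : List (List Int) :=
  (PySem.List.pyRange 0 7 1).foldl (fun grid _row =>
    grid ++ [((PySem.List.pyRange 0 7 1).foldl (fun cells _column =>
      cells ++ [(1 : Int)]) [])]) []

def pvHA : List (List Int) :=
  (PySem.List.pyRange 0 7 1).foldl (fun grid row =>
    grid ++ [((PySem.List.pyRange 0 7 1).foldl (fun cells column =>
      if (row < 2 ∧ column = 3) ∨ (row ≥ 5 ∧ column = 3)
      then cells ++ [(3 : Int)]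
      else cells ++ [(1 : Int)])
      [])]) []

def makeTestBoards (board_list : List (List (List Int))) : List (List (List Int)) :=
  ((board_list ++ [pvSetCell pvCrossA 3 3 0])
    ++ [pvSetCell pvSquareA 3 3 0])
    ++ [pvSetCell pvHA 3 3 0]

-- ===== PORT B =====
def pvUniform : List (List Int) := List.replicate 7 (List.replicate 7 (1 : Int))

def pvCrossB : List (List Int) :=
  [0, 1, 5, 6].foldl (fun g r =>
    [0, 1, 5, 6].foldl (fun g' c => pvSetCell g' r c 3) g) pvUniform

def pvHB : List (List Int) :=
  [0, 1, 5, 6].foldl (fun g r => pvSetCell g r 3 3) pvUniform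

def makeTestBoards_alt (board_list : List (List (List Int))) : List (List (List Int)) :=
  [pvCrossB, pvUniform, pvHB].foldl (fun acc g => acc ++ [pvSetCell g 3 3 0]) board_list

-- ===== PRECONDITION & SPEC =====
def Spec_makeTestBoards (board_list : List (List (List Int))) (out : List (List (List Int))) : Prop := out = makeTestBoards_alt board_list
instance (board_list : List (List (List Int))) (out : List (List (List Int))) : Decidable (Spec_makeTestBoards board_list out) := by unfold Spec_makeTestBoards; infer_instance

-- ===== CLAIM (what is proved, stated in full; the proofs are below) =====
def Claim_equal_makeTestBoards : Prop := ∀ (board_list : List (List (List Int))), Dom_makeTestBoards board_list → Spec_makeTestBoards board_list (makeTestBoards board_list)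

-- ===== LEMMAS AND PROOFS =====
theorem boards_eq :
    (pvSetCell pvCrossA 3 3 0 = pvSetCell pvCrossB 3 3 0) ∧
    (pvSetCell pvSquareA 3 3 0 = pvSetCell pvUniform 3 3 0) ∧
    (pvSetCell pvHA 3 3 0 = pvSetCell pvHB 3 3 0) := by decide

-- ===== VERDICT (by name: the statement is the Claim_ definition above) =====
theorem makeTestBoards_spec : Claim_equal_makeTestBoards := by
  intro bl _
  show makeTestBoards bl = makeTestBoards_alt bl
  simp only [makeTestBoards, makeTestBoards_alt, List.foldl]
  rw [boards_eq.1, boards_eq.2.1, boards_eq.2.2]
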